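-- pv_equiv track=rewrite | github.com/edirgarcia/murder-mystery | backend/app/werewolf/game_logic.py | resolve_day_vote
-- ===== SOURCE A (Python) =====
-- def resolve_day_vote(
--     votes: dict[str, str],
--     alive_player_ids: list[str],
-- ) -> str | None:
--     """Resolve day vote. Plurality wins, tie or skip majority = no elimination."""
--     vote_counts: dict[str, int] = {}
--     skip_count = 0
--     for target in votes.values():
--         if target == "skip":
--             skip_count += 1
--         else:
--             vote_counts[target] = vote_counts.get(target, 0) + 1
--
--     if not vote_counts:
--         return None
--
--     max_votes = max(vote_counts.values())
--     top_targets = [pid for pid, count in vote_counts.items() if count == max_votes]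
--
--     if len(top_targets) > 1:
--         return None
--
--     if skip_count >= max_votes:
--         return None
--
--     return top_targets[0]
-- ===== SOURCE B (Python) =====
-- def resolve_day_vote(votes, alive_player_ids):
--     targets = [t for t in votes.values() if t != "skip"]
--     skip_count = len(votes) - len(targets)
--     for i, t in enumerate(targets):
--         if t in targets[:i]:
--             continue  # this candidate was already considered
--         c = targets.count(t)
--         if all(targets.count(u) < c for u in targets if u != t):
--             return None if skip_count >= c else t
--     return None
-- ===== Notes on version B (the rewrite author's own statement) =====
-- stated objective: alternative
-- what changed: The count dict, max() and argmax comprehension are gone: B scans the flat list of non-skip targets and returns the first candidate whose list.count strictly exceeds every other target's count (pairwise dominance test), trading A's linear tally for dict-free pairwise comparisons.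
import Mathlib
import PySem

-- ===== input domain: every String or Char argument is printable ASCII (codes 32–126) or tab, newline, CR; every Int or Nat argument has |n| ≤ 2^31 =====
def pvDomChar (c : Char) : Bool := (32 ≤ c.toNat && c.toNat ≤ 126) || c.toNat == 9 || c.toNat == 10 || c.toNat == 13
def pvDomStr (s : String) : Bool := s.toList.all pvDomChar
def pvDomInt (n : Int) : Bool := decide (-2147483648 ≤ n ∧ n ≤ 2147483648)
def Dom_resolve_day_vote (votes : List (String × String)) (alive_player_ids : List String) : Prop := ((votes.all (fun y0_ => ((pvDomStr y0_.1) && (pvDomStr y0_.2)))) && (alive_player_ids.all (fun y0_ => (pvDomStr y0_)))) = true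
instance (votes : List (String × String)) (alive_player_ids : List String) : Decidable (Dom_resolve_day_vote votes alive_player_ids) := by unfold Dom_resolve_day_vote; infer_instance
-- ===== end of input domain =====

-- B is a dict-free alternative of the same cost class on game-sized inputs: instead of A's
-- count-dict + max() + argmax filter, B scans the flat list of non-skip targets and returns the
-- first candidate whose tally strictly dominates every other target's tally (pairwise list.count
-- comparisons); no dict and no max() are involved.

-- ===== PORT A =====
-- A's loop over votes.values(): builds (vote_counts, skip_count)
def countVotes (votes : List (String × String)) : PySem.Dict String Int × Int :=
  ((PySem.Dict.ofList votes).values).foldl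
    (fun st target =>
      if target == "skip" then (st.1, st.2 + 1)
      else (st.1.insert target (st.1.getD target 0 + 1), st.2))
    (PySem.Dict.empty, 0)

def resolve_day_vote (votes : List (String × String)) (alive_player_ids : List String) : Option String :=
  let st := countVotes votes
  let vote_counts := st.1
  let skip_count := st.2
  if vote_counts.items = [] then none
  else
    match PySem.List.max? vote_counts.values (fun x => x) with
    | none => none   -- unreachable: vote_counts nonempty
    | some max_votes =>
      let top_targets := (vote_counts.items.filter (fun p => p.2 == max_votes)).map (fun p => p.1)
      if 1 < top_targets.length then none
      else if max_votes ≤ skip_count then none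
      else top_targets.head?

-- ===== PORT B =====
-- B's for-loop over enumerate(targets): pre is targets[:i], rest the remaining suffix;
-- "continue" on a duplicate, early return once a strictly dominating candidate is found
def bScan (targets : List String) (skip_count : Int) (pre rest : List String) : Option String :=
  match rest with
  | [] => none
  | t :: rest' =>
    if pre.contains t then bScan targets skip_count (pre ++ [t]) rest'
    else
      let c : Int := (PySem.List.count targets t : Int)
      if (targets.filter (fun u => u != t)).all
          (fun u => decide ((PySem.List.count targets u : Int) < c)) then
        (if skip_count ≥ c then none else some t)
      else bScan targets skip_count (pre ++ [t]) rest'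

def resolve_day_vote_alt (votes : List (String × String)) (alive_player_ids : List String) : Option String :=
  let targets := ((PySem.Dict.ofList votes).values).filter (fun t => t != "skip")
  let skip_count : Int := ((PySem.Dict.ofList votes).size : Int) - (targets.length : Int)
  bScan targets skip_count [] targets

-- ===== PRECONDITION & SPEC =====
def Spec_resolve_day_vote (votes : List (String × String)) (alive_player_ids : List String) (out : Option String) : Prop := out = resolve_day_vote_alt votes alive_player_ids
instance (votes : List (String × String)) (alive_player_ids : List String) (out : Option String) : Decidable (Spec_resolve_day_vote votes alive_player_ids out) := by unfold Spec_resolve_day_vote; infer_instance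

-- ===== CLAIM (what is proved, stated in full; the proofs are below) =====
def Claim_equal_resolve_day_vote : Prop := ∀ (votes : List (String × String)) (alive_player_ids : List String), Dom_resolve_day_vote votes alive_player_ids → Spec_resolve_day_vote votes alive_player_ids (resolve_day_vote votes alive_player_ids)

-- ===== LEMMAS AND PROOFS =====
def Pb (ts : List String) (t : String) : Bool :=
  (ts.filter (fun u => u != t)).all
    (fun u => decide ((PySem.List.count ts u : Int) < (PySem.List.count ts t : Int)))

lemma Pb_iff (ts : List String) (t : String) :
    Pb ts t = true ↔ ∀ u ∈ ts, u ≠ t → List.count u ts < List.count t ts := by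
  unfold Pb
  rw [List.all_eq_true]
  constructor
  · intro h u hu hne
    have := h u (List.mem_filter.2 ⟨hu, by simp [bne_iff_ne, hne]⟩)
    simp only [decide_eq_true_eq, PySem.List.count] at this
    exact_mod_cast this
  · intro h u hu
    obtain ⟨hu1, hu2⟩ := List.mem_filter.1 hu
    rw [bne_iff_ne] at hu2
    simp only [decide_eq_true_eq, PySem.List.count]
    exact_mod_cast h u hu1 hu2

lemma find?_congr_val {α : Type} (l : List α) (p q : α → Bool)
    (h : ∀ x ∈ l, p x = q x) : l.find? p = l.find? q := by
  induction l with
  | nil => rfl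
  | cons x xs ih =>
    simp only [List.find?]
    rw [h x (by simp)]
    cases q x
    · exact ih (fun y hy => h y (by simp [hy]))
    · rfl



lemma bScan_eq_find (ts : List String) (skip : Int) :
    ∀ rest pre, bScan ts skip pre rest =
      match rest.find? (fun z => !pre.contains z && Pb ts z) with
      | none => none
      | some z => if skip ≥ (PySem.List.count ts z : Int) then none else some z := by
  intro rest
  induction rest with
  | nil => intro pre; simp [bScan]
  | cons hd rest' ih =>
    intro pre
    by_cases hp : pre.contains hd = true
    · have h1 : (!pre.contains hd && Pb ts hd) = false := by rw [hp]; rfl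
      have hpp : List.find? (fun z => !(pre ++ [hd]).contains z && Pb ts z) rest'
          = List.find? (fun z => !pre.contains z && Pb ts z) rest' := by
        apply find?_congr_val
        intro v _
        by_cases hv : v = hd
        · subst hv
          have h2 : (pre ++ [v]).contains v = true := by simp
          rw [h2, hp]
        · have h2 : (pre ++ [hd]).contains v = pre.contains v := by simp [hv]
          rw [h2]
      rw [bScan, if_pos hp, ih, hpp,
        List.find?_cons_of_neg (p := fun z => !pre.contains z && Pb ts z) (by dsimp only; rw [h1]; exact Bool.false_ne_true)]
    · have hp' : pre.contains hd = false := eq_false_of_ne_true hp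
      rw [bScan, if_neg hp]
      dsimp only
      by_cases hq : Pb ts hd = true
      · have h1 : (!pre.contains hd && Pb ts hd) = true := by rw [hp', hq]; rfl
        rw [List.find?_cons_of_pos (p := fun z => !pre.contains z && Pb ts z) h1]
        unfold Pb at hq
        rw [if_pos hq]
      · have hq' : Pb ts hd = false := eq_false_of_ne_true hq
        have h1 : (!pre.contains hd && Pb ts hd) = false := by rw [hq']; simp
        have hpp : List.find? (fun z => !(pre ++ [hd]).contains z && Pb ts z) rest'
            = List.find? (fun z => !pre.contains z && Pb ts z) rest' := by
          apply find?_congr_val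
          intro v _
          by_cases hv : v = hd
          · subst hv
            have h2 : (pre ++ [v]).contains v = true := by simp
            rw [h2, hq', hp']
            simp
          · have h2 : (pre ++ [hd]).contains v = pre.contains v := by simp [hv]
            rw [h2]
        have hq2 : ¬ ((ts.filter (fun u => u != hd)).all
            (fun u => decide ((PySem.List.count ts u : Int) < (PySem.List.count ts hd : Int))) = true) := by
          unfold Pb at hq'
          rw [hq']
          exact Bool.false_ne_true
        rw [if_neg hq2, ih, hpp,
          List.find?_cons_of_neg (p := fun z => !pre.contains z && Pb ts z) (by dsimp only; rw [h1]; exact Bool.false_ne_true)]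

lemma countVotes_eq (votes : List (String × String)) :
    countVotes votes =
      (PySem.Dict.counter (((PySem.Dict.ofList votes).values).filter (fun t => t != "skip")),
       (List.count "skip" ((PySem.Dict.ofList votes).values) : Int)) := by
  unfold countVotes
  generalize (PySem.Dict.ofList votes).values = vs
  have hbody : (fun (st : PySem.Dict String Int × Int) (target : String) =>
      if target == "skip" then (st.1, st.2 + 1)
      else (st.1.insert target (st.1.getD target 0 + 1), st.2))
    = (fun st target =>
      ((fun (d : PySem.Dict String Int) t => if t != "skip" then d.insert t (d.getD t 0 + 1) else d) st.1 target,
       (fun (s : Int) t => if t == "skip" then s + 1 else s) st.2 target)) := by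
    funext st target
    cases h : target == "skip" <;> simp [bne, h]
  rw [hbody, PySem.List.foldl_prod_mk
    (f := fun (d : PySem.Dict String Int) t => if t != "skip" then d.insert t (d.getD t 0 + 1) else d)
    (g := fun (s : Int) t => if t == "skip" then s + 1 else s)]
  have h1 : vs.foldl (fun (d : PySem.Dict String Int) t => if t != "skip" then d.insert t (d.getD t 0 + 1) else d) PySem.Dict.empty
      = PySem.Dict.counter (vs.filter (fun t => t != "skip")) := by
    rw [PySem.List.foldl_if_eq_foldl_filter (p := fun t => t != "skip")]
    exact PySem.Dict.foldl_insert_getD_add_one_eq_counter _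
  have h2 : vs.foldl (fun (s : Int) t => if t == "skip" then s + 1 else s) 0
      = (List.count "skip" vs : Int) := by
    rw [PySem.List.foldl_beq_add_one]
    simp
  rw [h1, h2]

lemma top_eq_filter (ts : List String) (M : Int) :
    ((PySem.Dict.counter ts).items.filter (fun p => p.2 == M)).map (fun p => p.1)
      = (PySem.Set.ofList ts).filter (fun k => (List.count k ts : Int) == M) := by
  rw [PySem.Dict.items_counter, List.filter_map, List.map_map]
  simp [Function.comp_def]

lemma core_eq (ts : List String) (skip : Int) :
    (if (PySem.Dict.counter ts).items = [] then none
     else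
       match PySem.List.max? (PySem.Dict.counter ts).values (fun x => x) with
       | none => none
       | some max_votes =>
         let top := ((PySem.Dict.counter ts).items.filter (fun p => p.2 == max_votes)).map (fun p => p.1)
         if 1 < top.length then none
         else if max_votes ≤ skip then none
         else top.head?)
    = bScan ts skip [] ts := by
  rw [bScan_eq_find]
  have hstart : ts.find? (fun z => !(List.contains [] z) && Pb ts z) = ts.find? (Pb ts) := by
    apply find?_congr_val; intro x _; rfl
  rw [hstart]
  have hitems : (PySem.Dict.counter ts).items
      = (PySem.Set.ofList ts).map (fun k => (k, (List.count k ts : Int))) :=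
    PySem.Dict.items_counter ts
  have hvals : (PySem.Dict.counter ts).values
      = (PySem.Set.ofList ts).map (fun k => (List.count k ts : Int)) := by
    simp [PySem.Dict.values, hitems]
  rcases eq_or_ne ts [] with rfl | hne
  · simp [PySem.Dict.counter, PySem.Dict.empty]
  · obtain ⟨x, hx⟩ := List.exists_mem_of_ne_nil ts hne
    have hxD : x ∈ PySem.Set.ofList ts := (PySem.Set.mem_ofList ts x).2 hx
    have hDne : PySem.Set.ofList ts ≠ [] := by
      intro h; rw [h] at hxD; simp at hxD
    have hine : (PySem.Dict.counter ts).items ≠ [] := by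
      rw [hitems]; simpa using hDne
    rw [if_neg hine]
    rcases hmax : PySem.List.max? (PySem.Dict.counter ts).values (fun x => x) with _ | M
    · exfalso
      rw [PySem.List.max?_eq_none_iff, hvals] at hmax
      exact hDne (List.map_eq_nil_iff.1 hmax)
    · have hMmem : M ∈ (PySem.Dict.counter ts).values := PySem.List.max?_mem hmax
      have hMmax : ∀ v ∈ (PySem.Dict.counter ts).values, v ≤ M := by
        intro v hv; exact PySem.List.max?_isMax hmax v hv
      rw [hvals] at hMmem hMmax
      obtain ⟨k1, hk1D, hk1M⟩ := List.mem_map.1 hMmem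
      have hle : ∀ k ∈ ts, (List.count k ts : Int) ≤ M := by
        intro k hk
        exact hMmax _ (List.mem_map_of_mem ((PySem.Set.mem_ofList ts k).2 hk))
      simp only [top_eq_filter]
      have hk1T : k1 ∈ (PySem.Set.ofList ts).filter (fun k => (List.count k ts : Int) == M) :=
        List.mem_filter.2 ⟨hk1D, by simp [hk1M]⟩
      have hTsub : ∀ k ∈ (PySem.Set.ofList ts).filter (fun k => (List.count k ts : Int) == M),
          k ∈ ts ∧ (List.count k ts : Int) = M := by
        intro k hk
        obtain ⟨h1, h2⟩ := List.mem_filter.1 hk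
        exact ⟨(PySem.Set.mem_ofList ts k).1 h1, by simpa using h2⟩
      by_cases hlen : 1 < ((PySem.Set.ofList ts).filter (fun k => (List.count k ts : Int) == M)).length
      · rw [if_pos hlen]
        have hnd : ((PySem.Set.ofList ts).filter (fun k => (List.count k ts : Int) == M)).Nodup :=
          List.Nodup.filter _ (PySem.Set.nodup_ofList ts)
        have hTne : (PySem.Set.ofList ts).filter (fun k => (List.count k ts : Int) == M) ≠ [] := by
          intro h; rw [h] at hlen; simp at hlen
        obtain ⟨a, T1, hT1e⟩ := List.exists_cons_of_ne_nil hTne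
        have hT1ne : T1 ≠ [] := by
          intro h; rw [hT1e, h] at hlen; simp at hlen
        obtain ⟨b, T2, hT2e⟩ := List.exists_cons_of_ne_nil hT1ne
        have hTab : (PySem.Set.ofList ts).filter (fun k => (List.count k ts : Int) == M)
            = a :: b :: T2 := by rw [hT1e, hT2e]
        have hab : a ≠ b := by
          rw [hTab] at hnd
          intro h; subst h
          exact (List.nodup_cons.1 hnd).1 (by simp)
        have haT : a ∈ (PySem.Set.ofList ts).filter (fun k => (List.count k ts : Int) == M) := by
          rw [hTab]; simp
        have hbT : b ∈ (PySem.Set.ofList ts).filter (fun k => (List.count k ts : Int) == M) := by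
          rw [hTab]; simp
        have hnof : ts.find? (Pb ts) = none := by
          rw [List.find?_eq_none]
          intro t ht hPb
          rw [Pb_iff] at hPb
          have hdom : ∀ k ∈ (PySem.Set.ofList ts).filter (fun k => (List.count k ts : Int) == M),
              k ≠ t → False := by
            intro k hk hkt
            obtain ⟨hkts, hkM⟩ := hTsub k hk
            have h1 := hPb k hkts hkt
            have h2 := hle t ht
            omega
          rcases eq_or_ne a t with rfl | hat
          · exact hdom b hbT (fun h => hab h.symm)
          · exact hdom a haT hat
        rw [hnof]
      · rw [if_neg hlen]
        have hlen1 : ((PySem.Set.ofList ts).filter (fun k => (List.count k ts : Int) == M)).length = 1 := by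
          have : 1 ≤ ((PySem.Set.ofList ts).filter (fun k => (List.count k ts : Int) == M)).length :=
            List.length_pos_of_mem hk1T
          omega
        obtain ⟨t0, hT1⟩ := List.length_eq_one_iff.1 hlen1
        have ht0T : t0 ∈ (PySem.Set.ofList ts).filter (fun k => (List.count k ts : Int) == M) := by
          rw [hT1]; simp
        obtain ⟨ht0ts, ht0M⟩ := hTsub t0 ht0T
        have honly : ∀ u ∈ ts, u ≠ t0 → (List.count u ts : Int) < M := by
          intro u hu hne'
          rcases lt_or_eq_of_le (hle u hu) with h | h
          · exact h
          · exfalso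
            have huT : u ∈ (PySem.Set.ofList ts).filter (fun k => (List.count k ts : Int) == M) :=
              List.mem_filter.2 ⟨(PySem.Set.mem_ofList ts u).2 hu, by simp [h]⟩
            rw [hT1] at huT; simp at huT; exact hne' huT
        have hPbt0 : Pb ts t0 = true := by
          rw [Pb_iff]
          intro u hu hne'
          have := honly u hu hne'
          omega
        have huniq : ∀ t ∈ ts, Pb ts t = true → t = t0 := by
          intro t ht hPb
          by_contra hne'
          rw [Pb_iff] at hPb
          have h1 := hPb t0 ht0ts (fun h => hne' h.symm)
          have h2 := hle t ht
          omega
        have hfind : ts.find? (Pb ts) = some t0 := by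
          have hs : (ts.find? (Pb ts)).isSome := List.find?_isSome.2 ⟨t0, ht0ts, hPbt0⟩
          obtain ⟨y, hy⟩ := Option.isSome_iff_exists.1 hs
          have := huniq y (List.mem_of_find?_eq_some hy) (List.find?_some hy)
          rw [hy, this]
        rw [hfind]
        have hcnt : (PySem.List.count ts t0 : Int) = M := by
          simpa [PySem.List.count] using ht0M
        rw [hT1]
        dsimp only
        rw [hcnt]
        by_cases hsk : M ≤ skip
        · rw [if_pos hsk, if_pos hsk]
        · rw [if_neg hsk, if_neg hsk]
          rfl

-- B's skip_count (len(votes) - len(targets)) equals A's running count of "skip"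
lemma skip_eq (votes : List (String × String)) :
    ((PySem.Dict.ofList votes).size : Int)
      - ((((PySem.Dict.ofList votes).values).filter (fun t => t != "skip")).length : Int)
    = (List.count "skip" ((PySem.Dict.ofList votes).values) : Int) := by
  have hsz : (PySem.Dict.ofList votes).size = ((PySem.Dict.ofList votes).values).length := by
    simp [PySem.Dict.size, PySem.Dict.values]
  rw [hsz]
  generalize (PySem.Dict.ofList votes).values = vs
  have key : (vs.filter (fun t => t != "skip")).length + List.count "skip" vs = vs.length := by
    simp only [List.count, ← List.countP_eq_length_filter]
    rw [List.length_eq_countP_add_countP (p := fun t => t != "skip")]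
    congr 1
    apply List.countP_congr
    intro x _
    cases h : x == "skip" <;> simp [bne, h]
  omega

-- ===== VERDICT (by name: the statement is the Claim_ definition above) =====
theorem resolve_day_vote_spec : Claim_equal_resolve_day_vote := by
  intro votes alive _
  unfold Spec_resolve_day_vote resolve_day_vote resolve_day_vote_alt
  dsimp only
  rw [countVotes_eq, skip_eq]
  exact core_eq _ _
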